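/- GENERATED by mk_final_copies.py from the proof of the farm's unit `compute_codewords.2` (farm:compute_codewords.2.1: Proof.lean) as the
   re-elaboration sweep compiled it — do not edit. -/
import Asan.CheckWalk
import Vorbis.Spec.Units.compute_codewords_2

/- Segment 2 of `compute_codewords` (`cut1` 0x108218 … `chk2` 0x108257, or the `ret`; stb_vorbis_fixed.c 1129 – 1130): loop 1120
   `for (k = 0; k < n; ++k) if (len[k] < NO_CODE) break;` with its check of `len[k]`, then `if (k == n) return TRUE;` through the
   epilogue (the frame's shadow bytes cleared: `cw_frame_popped`), or on to the check of `len[k]` for the first `add_entry`.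
   `cw2_walk` is the farm worker's continuation-passing walk (generic in the target `Q`); the unit's theorem applies it to the entry
   assertion `At1` and builds the exit assertion `AtFirst k`. -/
open X86 X86.User Asan Vorbis Vorbis.Spec
open Vorbis.Spec.compute_codewords

set_option maxRecDepth 4000
set_option maxHeartbeats 4000000

namespace Vorbis.Spec.compute_codewords_2

/-- **SEGMENT 2: cut1 0x108218 → loop 1120 → either the exit `k == n` through the epilogue to the `ret`, or `chk2` 0x108257** -/
theorem cw2_walk {Lay : Layout} (hLay : Lay.hi = 0x1000000) {μ : Microarch} (hμ : UserX.MicroOK μ) {u₀ : State}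
    (hcode : HasCodeNat Lay u₀ Vorbis.L.compute_codewords.entry Vorbis.Code.code_compute_codewords.nat Vorbis.L.compute_codewords.size)
    (hload1 : Asan.SmallCheck Lay μ Vorbis.WayInv (Vorbis.CodeOK u₀) [.rax, .rdx] 1 Vorbis.L.__asan_load1_noabort.entry)
    {others : List Obj} {frames : List (Nat × FrameLayout)} {Blk : Block → Prop} {u : State} {ret : Word}
    (hpre : CodewordsPre others frames Blk u)
    (he_align : (u.reg .rsp).toNat % 8 = 0) (he_room : 7340032 + 400 ≤ (u.reg .rsp).toNat)
    (he_top : (u.reg .rsp).toNat + 8 ≤ 8388608) (he_ret_lt : ret < 1073741824) (he_stack : Lay.Has (u.reg .rsp - 400) 408)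
    {s : State} (w_rip : s.rip = Vorbis.L.compute_codewords.cut1) (w_r15 : s.reg .r15 = (u.reg .rsp - 248) >>> 3)
    (w_rbp : s.reg .rbp = Word.ofBV (Word.part Width.w32 (u.reg .rdx))) (w_r12 : s.reg .r12 = u.reg .rsi)
    (w_kept : RegsKept [.rdi, .rsi, .rdx, .r15, .rax, .rbp, .r12, .rsp, .rcx, .r8, .r9, .r10, .r11, .r16, .r17, .r18, .r19, .r20, .r21,
        .r22, .r23, .r24, .r25, .r26, .r27, .r28, .r29, .r30, .r31] u s)
    (hb : CwBody u₀ u ret [] s) {Q : State → Prop}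
    (hfound : ∀ (s' : State) (k : Nat), s'.rip = Vorbis.L.compute_codewords.chk2 →
      s'.reg .r13 = Word.ofBV (BitVec.ofNat 32 k) →
      s'.reg .r14 = Word.ofBV (BitVec.signExtend 64 (BitVec.ofNat 32 k)) + u.reg .rsi →
      s'.reg .rdi = Word.ofBV (BitVec.signExtend 64 (BitVec.ofNat 32 k)) + u.reg .rsi →
      s'.reg .r15 = (u.reg .rsp - 248) >>> 3 →
      k < (u.reg .rdx).toNat % 2 ^ 32 → u.mem.u8 ((u.reg .rsi).toNat + k) ≠ 255 →
      (∀ j, j < k → u.mem.u8 ((u.reg .rsi).toNat + j) = 255) → CwBody u₀ u ret [] s' →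
      ReachVia Lay μ Vorbis.WayInv s' Q)
    (hret : ∀ v : State, Returned (Vorbis.conv u₀) (Vorbis.Spec.compute_codewords.spec others frames Blk) u ret v → Q v) :
    ReachVia Lay μ Vorbis.WayInv s Q := by
  obtain ⟨w_rsp, w_eq, hdf, hmx, hsame, hbody, hs0, hs1, hs2, hs3, hs4, hs5, hs6, hsLen, hsC, hsVal, hsN⟩ := hb
  have hsh := hpre.shadow
  have w_sse : SseOK s := ⟨hmx⟩
  have hsp := hsh.rsp
  have hn24 : (u.reg .rdx).toNat % 2 ^ 32 < 16777216 := by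
    have h1 : (((u.reg .rdx).toNat % 2 ^ 32 : Nat) : Int) = Codebook.entries u.mem (u.reg .rdi).toNat := hpre.n_eq
    have h2 := hpre.K1.ent_lt
    omega
  have hLive := cw_blkLive_pushed ((u.reg .rsp).toNat - 248) Vorbis.Frames.compute_codewords hpre.live
  have hN : ShadowUntouched u.mem (cw_prologueMem u) := by
    unfold cw_prologueMem
    v_untouched
  have hinvB : ShadowInv others (((u.reg .rsp).toNat - 248, Vorbis.Frames.compute_codewords) :: frames)
      ((u.reg .rsp).toNat - 296) (cw_poisonedMem u) :=
    cw_frame_pushed (u.reg .rsp) hsh.inv he_align (by omega) he_top hN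
  -- (the two shadow addresses as numbers: the reads of the epilogue's pops step over its shadow stores with them)
  have ea1 : ((u.reg .rsp - 248) >>> 3 + 12582912).toNat = 12582912 + ((u.reg .rsp).toNat - 248) / 8 := by
    u_omega
  have ea2 : ((u.reg .rsp - 248) >>> 3 + 12582932).toNat = 12582932 + ((u.reg .rsp).toNat - 248) / 8 := by
    u_omega
  u_walk hcode [hμ.vendor] until [Vorbis.L.compute_codewords.loop1] span [Vorbis.L.textLo, Vorbis.L.textHi] side (v_side)
  -- 0x10821e: the head of loop 1120 `for (k = 0; k < n; ++k) if (len[k] < NO_CODE) break;`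
  obtain ⟨k, hk13, hk, hall⟩ : ∃ k : Nat, s_108218.reg .r13 = Word.ofBV (BitVec.ofNat 32 k) ∧
      k ≤ (u.reg .rdx).toNat % 2 ^ 32 ∧ ∀ j, j < k → u.mem.u8 ((u.reg .rsi).toNat + j) = 255 :=
    ⟨0, w_r13, Nat.zero_le _, fun j hj => absurd hj (Nat.not_lt_zero j)⟩
  rw [← w_mem] at hsame hbody hs0 hs1 hs2 hs3 hs4 hs5 hs6 hsLen hsC hsVal hsN
  have hdf' : s_108218.flags .df = false := by
    rw [w_flags]
    exact hdf
  have hmx' : s_108218.mxcsr &&& 0x1F80 = 0x1F80 := by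
    rw [w_mxcsr]
    exact hmx
  replace w_kept := w_kept.mono_all (S' := [.rbx, .r13, .rdi, .rsi, .rdx, .r15, .rax, .rbp, .r12, .rsp, .rcx, .r8, .r9, .r10, .r11,
    .r16, .r17, .r18, .r19, .r20, .r21, .r22, .r23, .r24, .r25, .r26, .r27, .r28, .r29, .r30, .r31]) (by rfl)
  have h0rsp := w_rsp
  have h0eq := w_eq
  clear w_mem w_flags w_mxcsr hdf hmx w_sse w_r13
  u_loop [k] (fun v => (u.reg .rdx).toNat % 2 ^ 32 - (v.reg .r13).toNat)
  u_walk hcode [hμ.vendor] until [Vorbis.L.compute_codewords.loop1, Vorbis.L.compute_codewords.chk2] span [Vorbis.L.textLo, Vorbis.L.textHi] side (v_side)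
  · -- check_10822c: `len[k]`, `k < n`, lies in the block `len`; the body has the shadow the prologue left
    have hkn : k < (u.reg .rdx).toNat % 2 ^ 32 := by
      rw [cw_part32_toInt_small _ (by omega), cw_toInt_lit32 _ (by omega)] at hbr_108221
      omega
    have hw : Vorbis.L.textHi ≤ (u.reg .rsi).toNat ∧ (u.reg .rsi).toNat + (u.reg .rdx).toNat % 2 ^ 32 ≤ 0xC00000 ∧
        ((u.reg .rsp).toNat + 8 ≤ (u.reg .rsi).toNat ∨ (u.reg .rsi).toNat + (u.reg .rdx).toNat % 2 ^ 32 ≤ 0x700000 ∨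
          0x800000 ≤ (u.reg .rsi).toNat) :=
      blk_where hpre.live hsh.inv hsh.offText (by omega) hpre.lens (by show 1 ≤ (u.reg .rdx).toNat % 2 ^ 32; omega)
    have hun : ShadowUntouched (cw_poisonedMem u) s_10822c.mem := by
      rw [w_mem]
      exact Mem.EqOn.trans hbody (Mem.EqOn.writeLE _ _ _ _ _ _ (by u_omega) (by u_omega))
    refine check_site (a := (u.reg .rsi).toNat + k) hinvB hun (Site.of_blk hLive hpre.lens ?_ ?_ (Nat.le_refl 1))
      (cw_idx_addr k _ (by omega) (by omega))
    · show (u.reg .rsi).toNat ≤ (u.reg .rsi).toNat + k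
      omega
    · show (u.reg .rsi).toNat + k + 1 ≤ (u.reg .rsi).toNat + (u.reg .rdx).toNat % 2 ^ 32
      omega
  · -- `k ≥ n` and `k == n`: the exit 0x1083dd → the epilogue → the `ret`
    have hkn : k = (u.reg .rdx).toNat % 2 ^ 32 := by
      rw [Asan.part32_toNat] at hbr_108243
      omega
    refine ReachVia.done (Or.inl ?_)
    apply hret
    v_returned
    · -- the post: no net change of the shadow; eax = 1; no entry is used, so `se = 0` (CNT) and VAL is empty
      refine ⟨?_, Or.inr ?_, ?_⟩
      · rw [w_mem]
        exact cw_frame_popped (u.reg .rsp) hsh.inv.stack.clean (by omega) he_top hN hbody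
      · rw [w_rax]
        rfl
      · intro _ hsparse
        have hcnt := (hpre.sparse hsparse).1
        have hent : (Codebook.entries u.mem (u.reg .rdi).toNat).toNat = (u.reg .rdx).toNat % 2 ^ 32 := by
          have h1 : (((u.reg .rdx).toNat % 2 ^ 32 : Nat) : Int) = Codebook.entries u.mem (u.reg .rdi).toNat := hpre.n_eq
          omega
        have h0 : usedCount u.mem (u.reg .rsi).toNat k = 0 := by
          apply countBelow_eq_zero
          intro j hj
          unfold usedP
          exact decide_eq_false (fun hne => hne (hall j hj))
        unfold CNT at hcnt
        rw [hent, ← hkn, h0] at hcnt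
        have hse : (Codebook.sorted_entries u.mem (u.reg .rdi).toNat).toNat = 0 := by
          omega
        rw [hse]
        exact VAL.zero _ _ _
    · -- the footprint: the stack and the frame's 24 shadow bytes only
      simp only [X86.User.Spec.footprint, compute_codewords.spec_frame]
      by_cases hsparse : Codebook.sparse u.mem (u.reg .rdi).toNat = 0
      · rw [compute_codewords.spec_writes_dense others frames Blk u hsparse]
        simp only [compute_codewords.shadowSpan]
        u_same
      · rw [compute_codewords.spec_writes_sparse others frames Blk u hsparse]
        simp only [compute_codewords.shadowSpan]
        u_same
  · -- `k ≥ n` and `k ≠ n`: impossible (`k ≤ n`)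
    exfalso
    rw [cw_part32_toInt_small _ (by omega), cw_toInt_lit32 _ (by omega)] at hbr_108221
    rw [Asan.part32_toNat] at hbr_108243
    omega
  · -- `k < n`, `len[k] ≠ 255`, and `k == n`: impossible
    exfalso
    rw [cw_part32_toInt_small _ (by omega), cw_toInt_lit32 _ (by omega)] at hbr_108221
    rw [Asan.part32_toNat] at hbr_108243
    omega
  · -- `k < n`, `len[k] ≠ 255`: the first used entry, on to 0x108257 (chk2)
    have hkn : k < (u.reg .rdx).toNat % 2 ^ 32 := by
      rw [cw_part32_toInt_small _ (by omega), cw_toInt_lit32 _ (by omega)] at hbr_108221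
      omega
    have hw : Vorbis.L.textHi ≤ (u.reg .rsi).toNat ∧ (u.reg .rsi).toNat + (u.reg .rdx).toNat % 2 ^ 32 ≤ 0xC00000 ∧
        ((u.reg .rsp).toNat + 8 ≤ (u.reg .rsi).toNat ∨ (u.reg .rsi).toNat + (u.reg .rdx).toNat % 2 ^ 32 ≤ 0x700000 ∨
          0x800000 ≤ (u.reg .rsi).toNat) :=
      blk_where hpre.live hsh.inv hsh.offText (by omega) hpre.lens (by show 1 ≤ (u.reg .rdx).toNat % 2 ^ 32; omega)
    have hbyte := cw_len_byte (u.reg .rsp).toNat hsame (u.reg .rsi) k 1081905 (u.reg .rsp - 304) (by u_omega)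
      ⟨he_room, he_top⟩ (by omega) (by omega) (by omega)
    rw [hbyte] at hbr_108234
    have hne : u.mem.u8 ((u.reg .rsi).toNat + k) ≠ 255 := by
      intro h
      apply hbr_108234
      rw [h]
    have hbK : CwBody u₀ u ret [] s_108218 :=
      ⟨h0rsp, h0eq, hdf', hmx', hsame, hbody, hs0, hs1, hs2, hs3, hs4, hs5, hs6, hsLen, hsC, hsVal, hsN⟩
    have hE : Mem.EqOn ((u.reg .rsp).toNat - 296) ((u.reg .rsp).toNat + 8) s_108218.mem s_108254.mem := by
      rw [w_mem]
      exact Mem.EqOn.writeLE _ _ _ _ _ _ (by u_omega) (by u_omega)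
    have hi : X86.User.abiInv s_108254 := by
      v_inv
    refine (hfound s_108254 k w_rip w_r13 w_r14 w_rdi w_r15 hkn hne hall
      (hbK.carry hE he_room he_top w_rsp w_eq hi.1 hi.2 ?_ ?_)).mono (fun v h => Or.inl h)
    · u_same
    · rw [w_mem]
      exact Mem.EqOn.trans hbody (Mem.EqOn.writeLE _ _ _ _ _ _ (by u_omega) (by u_omega))
  · -- the back edge: `len[k] = 255`
    have hkn : k < (u.reg .rdx).toNat % 2 ^ 32 := by
      rw [cw_part32_toInt_small _ (by omega), cw_toInt_lit32 _ (by omega)] at hbr_108221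
      omega
    have hw : Vorbis.L.textHi ≤ (u.reg .rsi).toNat ∧ (u.reg .rsi).toNat + (u.reg .rdx).toNat % 2 ^ 32 ≤ 0xC00000 ∧
        ((u.reg .rsp).toNat + 8 ≤ (u.reg .rsi).toNat ∨ (u.reg .rsi).toNat + (u.reg .rdx).toNat % 2 ^ 32 ≤ 0x700000 ∨
          0x800000 ≤ (u.reg .rsi).toNat) :=
      blk_where hpre.live hsh.inv hsh.offText (by omega) hpre.lens (by show 1 ≤ (u.reg .rdx).toNat % 2 ^ 32; omega)
    have hbyte := cw_len_byte (u.reg .rsp).toNat hsame (u.reg .rsi) k 1081905 (u.reg .rsp - 304) (by u_omega)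
      ⟨he_room, he_top⟩ (by omega) (by omega) (by omega)
    rw [hbyte] at hbr_108234
    u_loop_back [k + 1]
    · -- still the shadow the prologue left
      rw [w_mem]
      exact Mem.EqOn.trans hbody (Mem.EqOn.writeLE _ _ _ _ _ _ (by u_omega) (by u_omega))
    · rw [w_r13]
      exact cw_inc_lit32 k
    · omega
    · intro j hj
      by_cases hjk : j = k
      · rw [hjk]
        have hlt := Mem.u8_lt u.mem ((u.reg .rsi).toNat + k)
        omega
      · exact hall j (by omega)
    · exact (show X86.User.abiInv s_10823a from by v_inv).1
    · exact (show X86.User.abiInv s_10823a from by v_inv).2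
    · rw [w_r13, cw_inc_lit32, cw_cnt_toNat _ (by omega), cw_cnt_toNat _ (by omega)]
      omega

end Vorbis.Spec.compute_codewords_2

/-- Unit `compute_codewords.2`: from `At1` at `cut1` to `AtFirst k` at `chk2`, or to the function's `Returned` (`k == n`). -/
theorem Vorbis.Spec.Worked.compute_codewords_2_ok : Vorbis.Spec.compute_codewords_2.Statement := by
  intro Lay hLay μ hμ u₀ hcode hload1 others frames Blk u ret v hat
  -- the entry state's facts, from the `AtEntry` the assertion carries
  have he := hat.entry
  v_entry he
  have hpre := hat.pre
  refine Vorbis.Spec.compute_codewords_2.cw2_walk hLay hμ hcode hload1 hpre he_align he_room he_top he_ret_lt he_stack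
    hat.rip hat.r15 hat.rbp hat.r12 hat.kept hat.body ?_ ?_
  · -- the first used entry: the exit assertion `AtFirst k`
    intro s' k h_rip h_r13 h_r14 h_rdi h_r15 hk hused hunused hbody
    exact ReachVia.done (Or.inl ⟨k, ⟨⟨hat.entry, hpre, hbody⟩, h_rip, h_r13, h_r14, h_rdi, h_r15, hk, hused, hunused⟩⟩)
  · -- `k == n`: returned
    intro w hw
    exact Or.inr hw
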